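-- pv_equiv track=rewrite | github.com/morganb27/advent-of-code-2016 | 02/Day02.py | decrypt_instrunctions_part_two
-- ===== SOURCE A (Python) =====
-- def decrypt_instrunctions_part_two(str, currentPosition):
--     keypad = {
--         '1': { 'U': '1', 'D': '3', 'L': '1', 'R': '1'},
--         '2': { 'U': '2', 'D': '6', 'L': '2', 'R': '3'},
--         '3': { 'U': '1', 'D': '7', 'L': '2', 'R': '4'},
--         '4': { 'U': '4', 'D': '8', 'L': '3', 'R': '4'},
--         '5': { 'U': '5', 'D': '5', 'L': '5', 'R': '6'},
--         '6': { 'U': '2', 'D': 'A', 'L': '5', 'R': '7'},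
--         '7': { 'U': '3', 'D': 'B', 'L': '6', 'R': '8'},
--         '8': { 'U': '4', 'D': 'C', 'L': '7', 'R': '9'},
--         '9': { 'U': '9', 'D': '9', 'L': '8', 'R': '9'},
--         'A': { 'U': '6', 'D': 'A', 'L': 'A', 'R': 'B'},
--         'B': { 'U': '7', 'D': 'D', 'L': 'A', 'R': 'C'},
--         'C': { 'U': '8', 'D': 'C', 'L': 'B', 'R': 'C'},
--         'D': { 'U': 'B', 'D': 'D', 'L': 'D', 'R': 'D'},
--     }
--     for char in str:
--         currentPosition = keypad[currentPosition][char]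
--     return currentPosition
-- ===== SOURCE B (Python) =====
-- def decrypt_instrunctions_part_two(str, currentPosition):
--     coords = {'1': (0, 2),
--               '2': (-1, 1), '3': (0, 1), '4': (1, 1),
--               '5': (-2, 0), '6': (-1, 0), '7': (0, 0), '8': (1, 0), '9': (2, 0),
--               'A': (-1, -1), 'B': (0, -1), 'C': (1, -1),
--               'D': (0, -2)}
--     symbols = {v: k for k, v in coords.items()}
--     deltas = {'U': (0, 1), 'D': (0, -1), 'L': (-1, 0), 'R': (1, 0)}
--     for char in str:
--         x, y = coords[currentPosition]
--         dx, dy = deltas[char]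
--         new = (x + dx, y + dy)
--         if new in symbols:
--             currentPosition = symbols[new]
--     return currentPosition
-- ===== Notes on version B (the rewrite author's own statement) =====
-- stated objective: idiomatic
-- what changed: Replaces the hand-written 13x4 transition table with a coordinate model of the diamond keypad: each key maps to an (x,y) grid point, U/D/L/R are (dx,dy) deltas, and a move is accepted iff the new point is a keypad cell.
import Mathlib
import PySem

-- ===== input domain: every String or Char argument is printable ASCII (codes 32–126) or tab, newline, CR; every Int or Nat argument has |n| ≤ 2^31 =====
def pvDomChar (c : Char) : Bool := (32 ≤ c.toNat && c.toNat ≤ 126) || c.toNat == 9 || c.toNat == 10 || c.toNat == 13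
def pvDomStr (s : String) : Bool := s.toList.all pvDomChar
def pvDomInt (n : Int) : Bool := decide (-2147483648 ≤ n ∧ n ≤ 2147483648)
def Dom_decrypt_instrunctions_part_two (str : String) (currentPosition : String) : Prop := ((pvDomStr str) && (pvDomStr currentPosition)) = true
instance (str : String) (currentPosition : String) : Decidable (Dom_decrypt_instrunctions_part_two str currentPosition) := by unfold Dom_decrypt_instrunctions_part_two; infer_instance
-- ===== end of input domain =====

-- B replaces A's hand-written 13x4 transition table by a coordinate model of the diamond
-- keypad (key → (x,y), move → delta, step accepted iff target is a keypad cell); idiomatic, same cost.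

-- ===== PORT A =====
-- the literal nested dict of A; a failed lookup (Python KeyError) is `none`
def pvKeypadA : PySem.Dict String (PySem.Dict Char String) := PySem.Dict.ofList
  [("1", PySem.Dict.ofList [('U',"1"),('D',"3"),('L',"1"),('R',"1")]),
   ("2", PySem.Dict.ofList [('U',"2"),('D',"6"),('L',"2"),('R',"3")]),
   ("3", PySem.Dict.ofList [('U',"1"),('D',"7"),('L',"2"),('R',"4")]),
   ("4", PySem.Dict.ofList [('U',"4"),('D',"8"),('L',"3"),('R',"4")]),
   ("5", PySem.Dict.ofList [('U',"5"),('D',"5"),('L',"5"),('R',"6")]),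
   ("6", PySem.Dict.ofList [('U',"2"),('D',"A"),('L',"5"),('R',"7")]),
   ("7", PySem.Dict.ofList [('U',"3"),('D',"B"),('L',"6"),('R',"8")]),
   ("8", PySem.Dict.ofList [('U',"4"),('D',"C"),('L',"7"),('R',"9")]),
   ("9", PySem.Dict.ofList [('U',"9"),('D',"9"),('L',"8"),('R',"9")]),
   ("A", PySem.Dict.ofList [('U',"6"),('D',"A"),('L',"A"),('R',"B")]),
   ("B", PySem.Dict.ofList [('U',"7"),('D',"D"),('L',"A"),('R',"C")]),
   ("C", PySem.Dict.ofList [('U',"8"),('D',"C"),('L',"B"),('R',"C")]),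
   ("D", PySem.Dict.ofList [('U',"B"),('D',"D"),('L',"D"),('R',"D")])]

def decrypt_instrunctions_part_two (str : String) (currentPosition : String) : String :=
  (str.toList.foldl
    (fun acc char => acc.bind (fun p => (pvKeypadA.get? p).bind (fun row => row.get? char)))
    (some currentPosition)).getD ""

-- ===== PORT B =====
def pvCoordsB : PySem.Dict String (Int × Int) := PySem.Dict.ofList
  [("1", (0, 2)),
   ("2", (-1, 1)), ("3", (0, 1)), ("4", (1, 1)),
   ("5", (-2, 0)), ("6", (-1, 0)), ("7", (0, 0)), ("8", (1, 0)), ("9", (2, 0)),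
   ("A", (-1, -1)), ("B", (0, -1)), ("C", (1, -1)),
   ("D", (0, -2))]

-- symbols = {v: k for k, v in coords.items()}
def pvSymbolsB : PySem.Dict (Int × Int) String :=
  PySem.Dict.ofList (pvCoordsB.items.map (fun kv => (kv.2, kv.1)))

def pvDeltasB : PySem.Dict Char (Int × Int) := PySem.Dict.ofList
  [('U', (0, 1)), ('D', (0, -1)), ('L', (-1, 0)), ('R', (1, 0))]

-- one loop iteration of Source B; `none` = Python KeyError
def pvStepB (p : String) (char : Char) : Option String :=
  (pvCoordsB.get? p).bind (fun xy =>
    (pvDeltasB.get? char).bind (fun d =>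
      let new := (xy.1 + d.1, xy.2 + d.2)
      match pvSymbolsB.get? new with
      | some s => some s
      | none => some p))

def decrypt_instrunctions_part_two_alt (str : String) (currentPosition : String) : String :=
  (str.toList.foldl (fun acc char => acc.bind (fun p => pvStepB p char))
    (some currentPosition)).getD ""

-- ===== PRECONDITION & SPEC =====
def pvKeys : List String := ["1","2","3","4","5","6","7","8","9","A","B","C","D"]
def pvMoves : List Char := ['U','D','L','R']

-- Pre_ excludes exactly the inputs on which A raises KeyError: a nonempty instruction string
-- with a start position that is not a keypad key, or containing a character other than U/D/L/R.
def Pre_decrypt_instrunctions_part_two (str : String) (currentPosition : String) : Prop :=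
  (str.toList.isEmpty || (pvKeys.contains currentPosition && str.toList.all (pvMoves.contains ·))) = true
instance (str : String) (currentPosition : String) : Decidable (Pre_decrypt_instrunctions_part_two str currentPosition) := by
  unfold Pre_decrypt_instrunctions_part_two; infer_instance

def pvWitness_decrypt_instrunctions_part_two : String × String := ("UL", "5")

def Spec_decrypt_instrunctions_part_two (str : String) (currentPosition : String) (out : String) : Prop := out = decrypt_instrunctions_part_two_alt str currentPosition
instance (str : String) (currentPosition : String) (out : String) : Decidable (Spec_decrypt_instrunctions_part_two str currentPosition out) := by unfold Spec_decrypt_instrunctions_part_two; infer_instance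

-- ===== CLAIM (what is proved, stated in full; the proofs are below) =====
def Claim_equal_decrypt_instrunctions_part_two : Prop := ∀ (str : String) (currentPosition : String), Dom_decrypt_instrunctions_part_two str currentPosition → Pre_decrypt_instrunctions_part_two str currentPosition → Spec_decrypt_instrunctions_part_two str currentPosition (decrypt_instrunctions_part_two str currentPosition)

-- ===== LEMMAS AND PROOFS =====

-- one step of A, matching the fold body of the A port
def pvStepA (p : String) (char : Char) : Option String :=
  (pvKeypadA.get? p).bind (fun row => row.get? char)

-- on valid key × valid move the two step functions agree, and the result is again a valid key
theorem pvStep_agree : ∀ p ∈ pvKeys, ∀ c ∈ pvMoves,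
    pvStepA p c = pvStepB p c ∧ ∃ q ∈ pvKeys, pvStepA p c = some q := by
  intro p hp c hc
  simp only [pvKeys, List.mem_cons, List.not_mem_nil, or_false] at hp
  simp only [pvMoves, List.mem_cons, List.not_mem_nil, or_false] at hc
  rcases hp with rfl|rfl|rfl|rfl|rfl|rfl|rfl|rfl|rfl|rfl|rfl|rfl|rfl <;>
    rcases hc with rfl|rfl|rfl|rfl <;> exact ⟨by decide, by decide⟩

theorem pvFold_agree (chars : List Char) (hc : ∀ c ∈ chars, c ∈ pvMoves) :
    ∀ p ∈ pvKeys,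
      chars.foldl (fun acc char => acc.bind (fun q => pvStepA q char)) (some p)
        = chars.foldl (fun acc char => acc.bind (fun q => pvStepB q char)) (some p) := by
  induction chars with
  | nil => intro p _; rfl
  | cons c cs ih =>
    intro p hp
    have hcm : c ∈ pvMoves := hc c (List.mem_cons_self ..)
    obtain ⟨hab, q, hq, hA⟩ := pvStep_agree p hp c hcm
    simp only [List.foldl_cons, Option.bind_some, hA, ← hab]
    exact ih (fun c' hc' => hc c' (List.mem_cons_of_mem _ hc')) q hq

-- ===== VERDICT (by name: the statement is the Claim_ definition above) =====
theorem decrypt_instrunctions_part_two_spec : Claim_equal_decrypt_instrunctions_part_two := by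
  intro str currentPosition _ hpre
  unfold Spec_decrypt_instrunctions_part_two
  unfold decrypt_instrunctions_part_two decrypt_instrunctions_part_two_alt
  unfold Pre_decrypt_instrunctions_part_two at hpre
  simp only [Bool.or_eq_true, Bool.and_eq_true, List.isEmpty_iff, List.all_eq_true,
    List.contains_iff_mem] at hpre
  rcases hpre with h | ⟨hp, hc⟩
  · rw [h]; rfl
  · have := pvFold_agree str.toList hc currentPosition hp
    simp only [pvStepA] at this
    rw [this]
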